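-- pv_equiv track=rewrite | github.com/kjihens/tftag-pipeline | src/tftag/splicecheck.py | _infer_introns_from_exons
-- ===== SOURCE A (Python) =====
-- from typing import Iterable
--
-- def _merge_intervals(intervals: Iterable[tuple[int, int]]) -> list[tuple[int, int]]:
--     """Merge overlapping or adjacent 1-based inclusive intervals."""
--     sorted_intervals = sorted(
--         (int(start), int(end))
--         for start, end in intervals
--         if int(end) >= int(start)
--     )
--
--     if not sorted_intervals:
--         return []
--
--     merged: list[tuple[int, int]] = []
--     cur_start, cur_end = sorted_intervals[0]
--
--     for start, end in sorted_intervals[1:]: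
--         if start <= cur_end + 1:
--             cur_end = max(cur_end, end)
--         else:
--             merged.append((cur_start, cur_end))
--             cur_start, cur_end = start, end
--
--     merged.append((cur_start, cur_end))
--     return merged
--
-- def _infer_introns_from_exons(
--     exons: list[tuple[int, int]],
-- ) -> list[tuple[int, int]]:
--     """
--     Infer intron intervals from transcript exon intervals.
--
--     Example
--     -------
--     exon1 = 100..200
--     exon2 = 300..400
--
--     inferred intron = 201..299
--     """
--     exons = _merge_intervals(exons)
--     introns: list[tuple[int, int]] = []
--
--     for (_, previous_exon_end), (next_exon_start, _) in zip(exons, exons[1:]):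
--         intron_start = previous_exon_end + 1
--         intron_end = next_exon_start - 1
--
--         if intron_end >= intron_start:
--             introns.append((intron_start, intron_end))
--
--     return introns
-- ===== SOURCE B (Python) =====
-- def _infer_introns_from_exons(exons):
--     pairs = sorted((int(s), int(e)) for s, e in exons if int(e) >= int(s))
--     introns = []
--     if not pairs:
--         return introns
--     cur_end = pairs[0][1]
--     for start, end in pairs[1:]:
--         if start <= cur_end + 1:
--             cur_end = max(cur_end, end)
--         else:
--             introns.append((cur_end + 1, start - 1))
--             cur_end = end
--     return introns
-- ===== Notes on version B (the rewrite author's own statement) =====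
-- stated objective: simpler
-- what changed: A builds an intermediate merged-interval list in one pass and then zips it with its tail in a second pass to extract gaps; B fuses both into a single loop over the sorted pairs that tracks only the current merged end and emits each intron gap directly, with no merged list, no zip pass and no cur_start variable.
import Mathlib
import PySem

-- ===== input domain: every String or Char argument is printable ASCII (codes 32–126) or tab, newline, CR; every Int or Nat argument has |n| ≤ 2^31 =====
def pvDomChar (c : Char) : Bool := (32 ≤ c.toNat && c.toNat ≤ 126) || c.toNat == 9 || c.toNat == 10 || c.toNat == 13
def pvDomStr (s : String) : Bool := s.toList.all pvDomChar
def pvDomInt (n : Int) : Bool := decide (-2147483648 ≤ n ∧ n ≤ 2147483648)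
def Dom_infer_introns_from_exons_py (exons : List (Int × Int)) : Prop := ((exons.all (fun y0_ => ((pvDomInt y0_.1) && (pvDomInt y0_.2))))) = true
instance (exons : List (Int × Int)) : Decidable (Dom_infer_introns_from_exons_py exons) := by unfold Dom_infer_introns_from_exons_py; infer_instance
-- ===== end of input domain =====

-- B fuses A's two passes (merge intervals, then zip adjacent merged pairs) into one
-- loop that tracks only the current merged end and emits each gap directly (objective: simpler).

-- ===== PORT A =====
-- _merge_intervals: the for-loop over sorted_intervals[1:] with state (cur_start, cur_end, merged)
def pvMergeLoop (cur_start cur_end : Int) (rest : List (Int × Int)) (merged : List (Int × Int)) : List (Int × Int) :=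
  match rest with
  | [] => merged ++ [(cur_start, cur_end)]
  | (s, e) :: tl =>
    if s ≤ cur_end + 1 then pvMergeLoop cur_start (max cur_end e) tl merged
    else pvMergeLoop s e tl (merged ++ [(cur_start, cur_end)])

def pvMergeIntervals (intervals : List (Int × Int)) : List (Int × Int) :=
  -- int(start), int(end) are identity on ints
  match PySem.List.sorted2 (intervals.filter fun p => decide (p.2 ≥ p.1)) Prod.fst Prod.snd with
  | [] => []
  | (cs, ce) :: rest => pvMergeLoop cs ce rest []

def infer_introns_from_exons_py (exons : List (Int × Int)) : List (Int × Int) :=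
  let ex := pvMergeIntervals exons
  (ex.zip (ex.drop 1)).foldl
    (fun introns pq =>
      let intron_start := pq.1.2 + 1
      let intron_end := pq.2.1 - 1
      if intron_end ≥ intron_start then introns ++ [(intron_start, intron_end)] else introns) []

-- ===== PORT B =====
-- the single fused loop of Source B, state (cur_end, introns)
def pvAltLoop (cur_end : Int) (rest : List (Int × Int)) (introns : List (Int × Int)) : List (Int × Int) :=
  match rest with
  | [] => introns
  | (s, e) :: tl =>
    if s ≤ cur_end + 1 then pvAltLoop (max cur_end e) tl introns
    else pvAltLoop e tl (introns ++ [(cur_end + 1, s - 1)])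

def infer_introns_from_exons_py_alt (exons : List (Int × Int)) : List (Int × Int) :=
  match PySem.List.sorted2 (exons.filter fun p => decide (p.2 ≥ p.1)) Prod.fst Prod.snd with
  | [] => []
  | p :: rest => pvAltLoop p.2 rest []

-- ===== PRECONDITION & SPEC =====
def Spec_infer_introns_from_exons_py (exons : List (Int × Int)) (out : List (Int × Int)) : Prop := out = infer_introns_from_exons_py_alt exons
instance (exons : List (Int × Int)) (out : List (Int × Int)) : Decidable (Spec_infer_introns_from_exons_py exons out) := by unfold Spec_infer_introns_from_exons_py; infer_instance

-- ===== CLAIM (what is proved, stated in full; the proofs are below) =====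
def Claim_equal_infer_introns_from_exons_py : Prop := ∀ (exons : List (Int × Int)), Dom_infer_introns_from_exons_py exons → Spec_infer_introns_from_exons_py exons (infer_introns_from_exons_py exons)

-- ===== LEMMAS AND PROOFS =====

-- A's zip pass as a function of the merged list
def pvGapStep (introns : List (Int × Int)) (pq : (Int × Int) × (Int × Int)) : List (Int × Int) :=
  let intron_start := pq.1.2 + 1
  let intron_end := pq.2.1 - 1
  if intron_end ≥ intron_start then introns ++ [(intron_start, intron_end)] else introns

def pvGaps (l : List (Int × Int)) : List (Int × Int) := (l.zip (l.drop 1)).foldl pvGapStep []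

theorem pvGapStep_foldl_acc (zs : List ((Int × Int) × (Int × Int))) (acc : List (Int × Int)) :
    zs.foldl pvGapStep acc = acc ++ zs.foldl pvGapStep [] := by
  induction zs generalizing acc with
  | nil => simp
  | cons z tl ih =>
    simp only [List.foldl_cons]
    rw [ih, ih (pvGapStep [] z)]
    simp [pvGapStep]
    split <;> simp

theorem pvMergeLoop_acc (rest : List (Int × Int)) (cs ce : Int) (m : List (Int × Int)) :
    pvMergeLoop cs ce rest m = m ++ pvMergeLoop cs ce rest [] := by
  induction rest generalizing cs ce m with
  | nil => simp [pvMergeLoop]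
  | cons p tl ih =>
    obtain ⟨s, e⟩ := p
    simp only [pvMergeLoop]
    split
    · exact ih _ _ _
    · rw [ih s e (m ++ [(cs, ce)]), ih s e ([] ++ [(cs, ce)])]
      simp

theorem pvAltLoop_acc (rest : List (Int × Int)) (ce : Int) (acc : List (Int × Int)) :
    pvAltLoop ce rest acc = acc ++ pvAltLoop ce rest [] := by
  induction rest generalizing ce acc with
  | nil => simp [pvAltLoop]
  | cons p tl ih =>
    obtain ⟨s, e⟩ := p
    simp only [pvAltLoop]
    split
    · exact ih _ _
    · rw [ih e (acc ++ [(ce + 1, s - 1)]), ih e ([] ++ [(ce + 1, s - 1)])]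
      simp

theorem pvMergeLoop_head (rest : List (Int × Int)) (cs ce : Int) :
    ∃ e' r, pvMergeLoop cs ce rest [] = (cs, e') :: r := by
  induction rest generalizing ce with
  | nil => exact ⟨ce, [], rfl⟩
  | cons p tl ih =>
    obtain ⟨s, e⟩ := p
    simp only [pvMergeLoop]
    split
    · exact ih _
    · exact ⟨ce, pvMergeLoop s e tl [], by rw [pvMergeLoop_acc]; simp⟩

theorem pvMain (rest : List (Int × Int)) (cs ce : Int) :
    pvGaps (pvMergeLoop cs ce rest []) = pvAltLoop ce rest [] := by
  induction rest generalizing cs ce with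
  | nil => rfl
  | cons p tl ih =>
    obtain ⟨s, e⟩ := p
    simp only [pvMergeLoop, pvAltLoop]
    split
    · exact ih _ _
    · rename_i hgt
      rw [pvMergeLoop_acc]
      obtain ⟨e', r, hr⟩ := pvMergeLoop_head tl s e
      rw [pvAltLoop_acc, ← ih s e, hr]
      simp only [pvGaps, List.nil_append, List.singleton_append, List.drop_succ_cons, List.drop_zero]
      have hcond : s - 1 ≥ ce + 1 := by omega
      rw [List.zip_cons_cons, List.foldl_cons, pvGapStep_foldl_acc]
      simp [pvGapStep, hcond]

-- ===== VERDICT (by name: the statement is the Claim_ definition above) =====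
theorem infer_introns_from_exons_py_spec : Claim_equal_infer_introns_from_exons_py := by
  intro exons _
  unfold Spec_infer_introns_from_exons_py infer_introns_from_exons_py infer_introns_from_exons_py_alt pvMergeIntervals
  cases h : PySem.List.sorted2 (exons.filter fun p => decide (p.2 ≥ p.1)) Prod.fst Prod.snd with
  | nil => rfl
  | cons p rest =>
    obtain ⟨cs, ce⟩ := p
    exact pvMain rest cs ce
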